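-- pv_equiv track=rewrite | github.com/soo5717/2021-Algorithm-Study | Programmers/eugene/34_week/방금 그곡.py | melody_find
-- ===== SOURCE A (Python) =====
-- def melody_find(m):
--     melody = []
--
--     for i in range(len(m)):
--         if i == len(m) - 1:
--             if m[i] != '#':
--                 melody.append(m[i])
--             break
--
--         if m[i] == '#':
--             continue
--
--         if m[i+1] != '#':
--             melody.append(m[i])
--         else:
--             melody.append(m[i]+m[i+1])
--
--     return melody
-- ===== SOURCE B (Python) =====
-- def melody_find(m):
--     # Single reversed pass with a pending-sharp flag, built back-to-front.
--     out = []
--     sharp = False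
--     for c in reversed(m):
--         if c == '#':
--             sharp = True
--         else:
--             out.append(c + '#' if sharp else c)
--             sharp = False
--     return out[::-1]
-- ===== Notes on version B (the rewrite author's own statement) =====
-- stated objective: alternative
-- what changed: Replaces the index loop with one-ahead lookahead and a skip branch for already-consumed sharp marks by a single reversed traversal carrying a pending-sharp flag, building the output back-to-front.
import Mathlib
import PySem

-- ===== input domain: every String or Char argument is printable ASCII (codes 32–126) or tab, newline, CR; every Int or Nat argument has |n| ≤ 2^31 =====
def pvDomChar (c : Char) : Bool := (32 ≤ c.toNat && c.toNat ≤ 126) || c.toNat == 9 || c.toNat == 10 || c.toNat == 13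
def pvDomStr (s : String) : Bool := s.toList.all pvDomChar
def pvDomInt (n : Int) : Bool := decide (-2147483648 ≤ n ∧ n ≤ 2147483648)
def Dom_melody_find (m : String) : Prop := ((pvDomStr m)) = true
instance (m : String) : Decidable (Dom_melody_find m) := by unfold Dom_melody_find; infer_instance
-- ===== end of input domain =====

-- B replaces A's index loop with lookahead by one reversed pass with a pending-sharp flag (alternative, same cost).

-- ===== PORT A =====
-- A's index loop: for i in range(len(m)) with break at the last index, '#'-skip, and m[i+1] lookahead.
def melodyA (l : List Char) (i : Nat) : List String :=
  if h : i < l.length then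
    if hlast : i = l.length - 1 then
      if l[i] ≠ '#' then [String.ofList [l[i]]] else []
    else
      have hx : i + 1 < l.length := by omega
      if l[i] = '#' then melodyA l (i+1)
      else if l[i+1] ≠ '#' then String.ofList [l[i]] :: melodyA l (i+1)
      else String.ofList [l[i], l[i+1]] :: melodyA l (i+1)
  else []
termination_by l.length - i

def melody_find (m : String) : List String := melodyA m.toList 0

-- ===== PORT B =====
-- one step of B's loop body: c is the current char of reversed(m), state = (out, sharp)
def bstep (st : List String × Bool) (c : Char) : List String × Bool :=
  if c = '#' then (st.1, true)
  else (st.1 ++ [if st.2 then String.ofList [c, '#'] else String.ofList [c]], false)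

def melody_find_alt (m : String) : List String :=
  (m.toList.reverse.foldl bstep ([], false)).1.reverse

-- ===== PRECONDITION & SPEC =====
def Spec_melody_find (m : String) (out : List String) : Prop := out = melody_find_alt m
instance (m : String) (out : List String) : Decidable (Spec_melody_find m out) := by unfold Spec_melody_find; infer_instance

-- ===== CLAIM (what is proved, stated in full; the proofs are below) =====
def Claim_equal_melody_find : Prop := ∀ (m : String), Dom_melody_find m → Spec_melody_find m (melody_find m)

-- ===== LEMMAS AND PROOFS =====

-- canonical tokenization both ports are proved equal to
def tok : List Char → List String
  | [] => []
  | [c] => if c = '#' then [] else [String.ofList [c]]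
  | c :: d :: rest =>
      if c = '#' then tok (d :: rest)
      else if d = '#' then String.ofList [c, '#'] :: tok rest
      else String.ofList [c] :: tok (d :: rest)

theorem tok_nil : tok [] = [] := rfl

theorem tok_single (c : Char) : tok [c] = if c = '#' then [] else [String.ofList [c]] := rfl

theorem tok_cons2 (c d : Char) (rest : List Char) :
    tok (c :: d :: rest) =
      if c = '#' then tok (d :: rest)
      else if d = '#' then String.ofList [c, '#'] :: tok rest
      else String.ofList [c] :: tok (d :: rest) := rfl

theorem tok_sharp (l : List Char) : tok ('#' :: l) = tok l := by
  cases l with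
  | nil => simp [tok_single, tok_nil]
  | cons d rest => simp [tok_cons2]

theorem melodyA_eq_tok (l : List Char) (i : Nat) : melodyA l i = tok (l.drop i) := by
  induction i using melodyA.induct l with
  | case1 h hne =>
      rw [List.drop_eq_getElem_cons h, List.drop_eq_nil_of_le (by omega)]
      rw [melodyA]; simp [h, hne, tok_single]
  | case2 h hne =>
      rw [List.drop_eq_getElem_cons h, List.drop_eq_nil_of_le (by omega)]
      rw [melodyA]; simp [h, hne, tok_single]
  | case3 i h hlast hx hsharp ih =>
      rw [melodyA]
      simp [h, hlast, hsharp, ih]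
      have hdi : List.drop i l = '#' :: List.drop (i+1) l := by
        rw [List.drop_eq_getElem_cons h, hsharp]
      rw [hdi, tok_sharp]
  | case4 i h hlast hx hsharp hnext ih =>
      rw [melodyA]
      simp [h, hlast, hsharp, hnext, ih]
      have hdi : List.drop i l = l[i] :: List.drop (i+1) l := List.drop_eq_getElem_cons h
      have hdx : List.drop (i+1) l = l[i+1] :: List.drop (i+2) l := List.drop_eq_getElem_cons hx
      rw [hdi, hdx, tok_cons2]
      simp [hsharp, hnext]
  | case5 i h hlast hx hsharp hnext ih =>
      rw [melodyA]
      have hd : l[i+1] = '#' := by by_contra hc; exact hnext hc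
      simp [h, hlast, hsharp, hnext, ih]
      have hdi : List.drop i l = l[i] :: List.drop (i+1) l := List.drop_eq_getElem_cons h
      have hdx : List.drop (i+1) l = '#' :: List.drop (i+2) l := by
        rw [List.drop_eq_getElem_cons hx, hd]
      rw [hdi, hdx, tok_cons2, tok_sharp]
      simp [hsharp, hd]
  | case6 i h =>
      have hle : l.length ≤ i := by omega
      rw [melodyA, List.drop_eq_nil_of_le hle]
      simp [h, tok_nil]

theorem bfold_eq_tok (l : List Char) :
    l.reverse.foldl bstep ([], false) = ((tok l).reverse, l.head? == some '#') := by
  induction l with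
  | nil => simp [tok_nil]
  | cons c l ih =>
      have : (c :: l).reverse = l.reverse ++ [c] := by simp
      rw [this, List.foldl_append, ih]
      by_cases hc : c = '#'
      · subst hc
        simp [bstep, tok_sharp]
      · cases l with
        | nil => simp [bstep, hc, tok_single, tok_nil]
        | cons d rest =>
            by_cases hd : d = '#'
            · subst hd
              simp [bstep, hc, tok_cons2, tok_sharp]
            · simp [bstep, hc, hd, tok_cons2]

-- ===== VERDICT (by name: the statement is the Claim_ definition above) =====
theorem melody_find_spec : Claim_equal_melody_find := by
  intro m _
  unfold Spec_melody_find melody_find melody_find_alt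
  rw [bfold_eq_tok, melodyA_eq_tok]
  simp
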